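-- pv_equiv track=rewrite | github.com/jfcarter2358/Ceres-Prototype | src/index.py | add_ident
-- ===== SOURCE A (Python) =====
-- def add_ident(ident, idents):
--     if len(idents) == 0:
--         return []
--     pivot = int(len(idents) / 2)
--     if pivot == 0:
--         if idents[pivot] == ident:
--             return idents
--         if idents[pivot] < ident:
--             return idents + [ident]
--         return [ident] + idents
--
--     if idents[pivot - 1] <= ident:
--         if idents[pivot] > ident:
--             return idents[:pivot] + [ident] + idents[pivot:]
--         return idents[:pivot] + add_ident(ident, idents[pivot:])
--     return add_ident(ident, idents[:pivot]) + idents[pivot:]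
-- ===== SOURCE B (Python) =====
-- def add_ident(ident, idents):
--     # Iterative binary search over an index window [lo, hi); never mutates the input.
--     if len(idents) == 0:
--         return []
--     lo, hi = 0, len(idents)
--     idx = None
--     while True:
--         p = (hi - lo) // 2
--         if p == 0:
--             if idents[lo] == ident:
--                 return list(idents)
--             idx = lo + 1 if idents[lo] < ident else lo
--             break
--         if idents[lo + p - 1] <= ident:
--             if idents[lo + p] > ident:
--                 idx = lo + p
--                 break
--             lo = lo + p
--         else:
--             hi = lo + p
--     return idents[:idx] + [ident] + idents[idx:]
-- ===== Notes on version B (the rewrite author's own statement) =====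
-- stated objective: alternative
-- what changed: Replaces A's slice-and-recurse binary insertion (which rebuilds list slices at every recursion level) by an iterative binary search over an index window [lo, hi) that first computes a single insertion index and then builds the result with one concatenation.
import Mathlib
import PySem

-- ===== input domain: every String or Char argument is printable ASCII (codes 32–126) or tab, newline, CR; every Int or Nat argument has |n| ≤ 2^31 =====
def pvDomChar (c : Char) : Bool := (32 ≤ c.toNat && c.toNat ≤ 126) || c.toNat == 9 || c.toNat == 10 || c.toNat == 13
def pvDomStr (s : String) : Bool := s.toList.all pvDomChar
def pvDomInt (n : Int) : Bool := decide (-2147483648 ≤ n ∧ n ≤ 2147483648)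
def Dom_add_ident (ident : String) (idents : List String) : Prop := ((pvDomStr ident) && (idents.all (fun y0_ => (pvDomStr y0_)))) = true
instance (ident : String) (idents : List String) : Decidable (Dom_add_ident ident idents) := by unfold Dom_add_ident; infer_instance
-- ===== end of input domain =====

-- B replaces A's slice-and-recurse binary insertion by an iterative binary search over an
-- index window [lo, hi) that first computes one insertion index and then builds the result
-- with a single concatenation (objective: alternative decomposition; neither mutates its input).

-- ===== PORT A =====
-- Literal port of A. Python's `int(len(idents)/2)` equals `len / 2` on Nat (lengths are far
-- below 2^53, where float division of a Nat by 2 truncated is exact floor division);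
-- `idents[:p]` / `idents[p:]` with 0 ≤ p ≤ len are exactly `take p` / `drop p`; the indices
-- pivot and pivot-1 are always in range (pivot < len, and pivot ≥ 1 in the branch using
-- pivot-1), so `getD _ ""` is exact where Python indexes.
def add_ident (ident : String) (idents : List String) : List String :=
  if _h0 : idents.length = 0 then []
  else
    let pivot := idents.length / 2
    if _hp : pivot = 0 then
      if idents.getD pivot "" = ident then idents
      else if idents.getD pivot "" < ident then idents ++ [ident]
      else [ident] ++ idents
    else
      if idents.getD (pivot - 1) "" ≤ ident then
        if ident < idents.getD pivot "" then
          idents.take pivot ++ [ident] ++ idents.drop pivot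
        else
          idents.take pivot ++ add_ident ident (idents.drop pivot)
      else
        add_ident ident (idents.take pivot) ++ idents.drop pivot
termination_by idents.length
decreasing_by
  · have : idents.length / 2 < idents.length := Nat.div_lt_self (by omega) (by omega)
    simp; omega
  · simp; have : idents.length / 2 < idents.length := Nat.div_lt_self (by omega) (by omega)
    omega

-- ===== PORT B =====
-- Source B's while-loop: narrows [lo, hi) until it either detects a duplicate (none) or finds
-- the absolute insertion index (some idx). Indices lo, lo+p-1, lo+p are always in range at
-- the call site, so `getD _ ""` is exact where Source B indexes.
def add_ident_altLoop (ident : String) (idents : List String) (lo hi : Nat) : Option Nat :=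
  let p := (hi - lo) / 2
  if hp : p = 0 then
    if idents.getD lo "" = ident then none
    else if idents.getD lo "" < ident then some (lo + 1) else some lo
  else
    if idents.getD (lo + p - 1) "" ≤ ident then
      if ident < idents.getD (lo + p) "" then some (lo + p)
      else add_ident_altLoop ident idents (lo + p) hi
    else
      add_ident_altLoop ident idents lo (lo + p)
termination_by hi - lo
decreasing_by
  · omega
  · omega

def add_ident_alt (ident : String) (idents : List String) : List String :=
  if idents.length = 0 then []
  else
    match add_ident_altLoop ident idents 0 idents.length with
    | none => idents
    | some idx => idents.take idx ++ [ident] ++ idents.drop idx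

-- ===== PRECONDITION & SPEC =====
def Spec_add_ident (ident : String) (idents : List String) (out : List String) : Prop := out = add_ident_alt ident idents
instance (ident : String) (idents : List String) (out : List String) : Decidable (Spec_add_ident ident idents out) := by unfold Spec_add_ident; infer_instance

-- ===== CLAIM (what is proved, stated in full; the proofs are below) =====
def Claim_equal_add_ident : Prop := ∀ (ident : String) (idents : List String), Dom_add_ident ident idents → Spec_add_ident ident idents (add_ident ident idents)

-- ===== LEMMAS AND PROOFS =====

theorem add_ident_altLoop_bounds (ident : String) (idents : List String) :
    ∀ n lo hi, hi - lo = n → lo < hi →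
      ∀ idx, add_ident_altLoop ident idents lo hi = some idx → lo ≤ idx ∧ idx ≤ hi := by
  intro n
  induction n using Nat.strong_induction_on with
  | _ n ih =>
    intro lo hi hn hlt idx h
    rw [add_ident_altLoop] at h
    split_ifs at h with h1 h2 h3 h4 h5
    all_goals try simp only [Option.some.injEq] at h
    · omega
    · omega
    · omega
    · have := ih (hi - (lo + (hi - lo) / 2)) (by omega) (lo + (hi - lo) / 2) hi rfl (by omega) idx h
      omega
    · have := ih ((lo + (hi - lo) / 2) - lo) (by omega) lo (lo + (hi - lo) / 2) rfl (by omega) idx h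
      omega

theorem pv_getD_slice (l : List String) (lo n i : Nat) (h : i < n) :
    ((l.drop lo).take n).getD i "" = l.getD (lo + i) "" := by
  simp [List.getD_eq_getElem?_getD, List.getElem?_take_of_lt h, List.getElem?_drop]

theorem pv_drop_slice (l : List String) (p n lo : Nat) :
    ((l.drop lo).take n).drop p = (l.drop (lo + p)).take (n - p) := by
  rw [List.drop_take, List.drop_drop]

theorem pv_drop_take_append (s : List String) (i p : Nat) (h : i ≤ p) :
    (s.take p).drop i ++ s.drop p = s.drop i := by
  rw [List.drop_take]
  rw [show s.drop p = (s.drop i).drop (p - i) from by rw [List.drop_drop]; congr 1; omega]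
  exact List.take_append_drop _ _

theorem add_ident_key (ident : String) (idents : List String) :
    ∀ n lo hi, hi - lo = n → lo < hi → hi ≤ idents.length →
      add_ident ident ((idents.drop lo).take (hi - lo)) =
        match add_ident_altLoop ident idents lo hi with
        | none => (idents.drop lo).take (hi - lo)
        | some idx =>
            ((idents.drop lo).take (hi - lo)).take (idx - lo) ++ [ident] ++
              ((idents.drop lo).take (hi - lo)).drop (idx - lo) := by
  intro n
  induction n using Nat.strong_induction_on with
  | _ n ih =>
    intro lo hi hn hlt hle
    have hslen : ((idents.drop lo).take (hi - lo)).length = hi - lo := by simp; omega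
    rw [add_ident, add_ident_altLoop]
    rw [dif_neg (by omega)]
    rw [hslen]
    by_cases hp : (hi - lo) / 2 = 0
    · have h1 : hi - lo = 1 := by omega
      rw [dif_pos hp, dif_pos hp, hp]
      have e0 : ((idents.drop lo).take (hi - lo)).getD 0 "" = idents.getD lo "" := by
        rw [pv_getD_slice idents lo (hi - lo) 0 (by omega), Nat.add_zero]
      rw [e0]
      by_cases heq : idents.getD lo "" = ident
      · rw [if_pos heq, if_pos heq]
      · rw [if_neg heq, if_neg heq]
        by_cases hlt2 : idents.getD lo "" < ident
        · rw [if_pos hlt2, if_pos hlt2]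
          rw [h1]
          have hts : (((idents.drop lo).take 1).take (lo + 1 - lo)) = (idents.drop lo).take 1 := by
            rw [List.take_take]; congr 1; omega
          have hds : (((idents.drop lo).take 1).drop (lo + 1 - lo)) = [] := by
            rw [List.drop_take]
            rw [show lo + 1 - lo = 1 from by omega]
            simp
          simp only [hts, hds]
          simp
        · rw [if_neg hlt2, if_neg hlt2]
          simp
    · rw [dif_neg hp, dif_neg hp]
      have hge2 : 2 ≤ hi - lo := by omega
      have hplt : (hi - lo) / 2 < hi - lo := by omega
      have e1 : ((idents.drop lo).take (hi - lo)).getD ((hi - lo) / 2 - 1) "" =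
          idents.getD (lo + (hi - lo) / 2 - 1) "" := by
        rw [pv_getD_slice idents lo (hi - lo) _ (by omega)]; congr 1; omega
      have e2 : ((idents.drop lo).take (hi - lo)).getD ((hi - lo) / 2) "" =
          idents.getD (lo + (hi - lo) / 2) "" := pv_getD_slice idents lo (hi - lo) _ hplt
      rw [e1, e2]
      by_cases hle1 : idents.getD (lo + (hi - lo) / 2 - 1) "" ≤ ident
      · rw [if_pos hle1, if_pos hle1]
        by_cases hlt1 : ident < idents.getD (lo + (hi - lo) / 2) ""
        · rw [if_pos hlt1, if_pos hlt1]
          simp only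
          rw [show lo + (hi - lo) / 2 - lo = (hi - lo) / 2 from by omega]
        · rw [if_neg hlt1, if_neg hlt1]
          have hdrop : ((idents.drop lo).take (hi - lo)).drop ((hi - lo) / 2) =
              (idents.drop (lo + (hi - lo) / 2)).take (hi - (lo + (hi - lo) / 2)) := by
            rw [pv_drop_slice]; congr 1; omega
          rw [hdrop]
          rw [ih (hi - (lo + (hi - lo) / 2)) (by omega) (lo + (hi - lo) / 2) hi rfl (by omega) hle]
          cases hL : add_ident_altLoop ident idents (lo + (hi - lo) / 2) hi with
          | none =>
            simp only
            rw [← hdrop, List.take_append_drop]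
          | some idx =>
            obtain ⟨hb1, hb2⟩ := add_ident_altLoop_bounds ident idents _ _ _ rfl (by omega) idx hL
            simp only
            rw [← hdrop]
            rw [show ((idents.drop lo).take (hi - lo)).take (idx - lo) =
                  ((idents.drop lo).take (hi - lo)).take ((hi - lo) / 2) ++
                    (((idents.drop lo).take (hi - lo)).drop ((hi - lo) / 2)).take (idx - (lo + (hi - lo) / 2)) from by
              rw [← List.take_add]; congr 1; omega]
            rw [show ((idents.drop lo).take (hi - lo)).drop (idx - lo) =
                  (((idents.drop lo).take (hi - lo)).drop ((hi - lo) / 2)).drop (idx - (lo + (hi - lo) / 2)) from by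
              rw [List.drop_drop]; congr 1; omega]
            simp [List.append_assoc]
      · rw [if_neg hle1, if_neg hle1]
        have htake : ((idents.drop lo).take (hi - lo)).take ((hi - lo) / 2) =
            (idents.drop lo).take (lo + (hi - lo) / 2 - lo) := by
          rw [List.take_take]
          congr 1
          omega
        rw [htake]
        rw [ih (lo + (hi - lo) / 2 - lo) (by omega) lo (lo + (hi - lo) / 2) rfl (by omega) (by omega)]
        cases hL : add_ident_altLoop ident idents lo (lo + (hi - lo) / 2) with
        | none =>
          simp only
          rw [← htake, List.take_append_drop]
        | some idx =>
          obtain ⟨hb1, hb2⟩ := add_ident_altLoop_bounds ident idents _ _ _ rfl (by omega) idx hL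
          simp only
          rw [← htake]
          rw [show (((idents.drop lo).take (hi - lo)).take ((hi - lo) / 2)).take (idx - lo) =
                ((idents.drop lo).take (hi - lo)).take (idx - lo) from by
            rw [List.take_take]; congr 1; omega]
          simp only [List.append_assoc]
          rw [pv_drop_take_append ((idents.drop lo).take (hi - lo)) (idx - lo) ((hi - lo) / 2)
                (by omega)]

-- ===== VERDICT (by name: the statement is the Claim_ definition above) =====
theorem add_ident_spec : Claim_equal_add_ident := by
  intro ident idents _
  show add_ident ident idents = add_ident_alt ident idents
  by_cases h0 : idents.length = 0
  · rw [add_ident_alt, if_pos h0, add_ident, dif_pos h0]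
  · have key := add_ident_key ident idents (idents.length - 0) 0 idents.length rfl (by omega) le_rfl
    simp only [Nat.sub_zero, List.drop_zero, List.take_length] at key
    rw [add_ident_alt, if_neg h0, key]
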